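-- pv_equiv track=rewrite | github.com/MrBrantCode/unitest_baseline | mut_generate/mist_train_taco/taco_18153/solution.py | generate_last_row
-- ===== SOURCE A (Python) =====
-- def generate_last_row(n, m, first_row):
--     ar = tuple(first_row)
--     i = 1
--     m -= 1
--     while m:
--         if m & 1:
--             j = i % n
--             ar = tuple((ar[pos] ^ ar[(pos + j) % n] for pos in range(n)))
--         m >>= 1
--         i <<= 1
--     return list(ar)
-- ===== SOURCE B (Python) =====
-- def generate_last_row(n, m, first_row):
--     t = m - 1
--     if t == 0:
--         return list(first_row)
--     # parity kernel of the t-fold transform: the polynomial (1+X)^t in GF(2)[X]/(X^n - 1)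
--     ker = [1 if r == 0 else 0 for r in range(n)]
--     s = 1 % n
--     while t:
--         if t & 1:
--             ker = [ker[r] ^ ker[(r - s) % n] for r in range(n)]
--         s = s * 2 % n
--         t >>= 1
--     # one gather pass: each output is the XOR of the inputs the kernel selects
--     out = []
--     for p in range(n):
--         v = 0
--         for r in range(n):
--             if ker[r]:
--                 v ^= first_row[(p + r) % n]
--         out.append(v)
--     return out
-- ===== Notes on version B (the rewrite author's own statement) =====
-- stated objective: alternative
-- what changed: B never transforms the data row per bit: it builds the 0/1 parity kernel of the (m-1)-fold transform (the polynomial (1+X)^(m-1) in GF(2)[X]/(X^n-1)) as a separate mask, then produces the result in one gather pass XOR-ing the row entries the kernel selects; A instead applies the shift-XOR step to the row once per set bit of m-1.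
import Mathlib
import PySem

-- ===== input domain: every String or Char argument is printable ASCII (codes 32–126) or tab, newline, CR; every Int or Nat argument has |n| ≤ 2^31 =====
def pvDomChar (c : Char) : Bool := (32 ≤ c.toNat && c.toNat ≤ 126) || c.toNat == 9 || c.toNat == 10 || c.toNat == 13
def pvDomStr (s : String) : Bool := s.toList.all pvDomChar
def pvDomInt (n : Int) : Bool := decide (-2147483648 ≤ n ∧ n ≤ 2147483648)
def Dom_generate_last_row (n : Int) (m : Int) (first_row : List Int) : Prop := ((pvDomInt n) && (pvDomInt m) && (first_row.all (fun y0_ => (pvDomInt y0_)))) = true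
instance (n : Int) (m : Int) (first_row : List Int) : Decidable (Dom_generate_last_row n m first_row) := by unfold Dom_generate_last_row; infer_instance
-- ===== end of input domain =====

-- B replaces A's per-bit transformation of the data row by an operator-representation
-- algorithm: it builds the 0/1 parity kernel of the (m-1)-fold transform (the polynomial
-- (1+X)^(m-1) in GF(2)[X]/(X^n-1)) and applies it to the row in a single gather pass
-- (objective: alternative).


-- ===== PORT A =====
-- tuple(ar[pos] ^ ar[(pos + j) % n] for pos in range(n)); pyGetD with default 0 is exact
-- here because under Pre_ every index used is in range (0 ≤ pos < n ≤ len ar, 0 ≤ (pos+j)%n < n).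
def pvStepA (n : Int) (j : Int) (ar : List Int) : List Int :=
  (PySem.List.pyRange 0 n 1).map (fun pos =>
    PySem.Int.bxor (PySem.List.pyGetD ar pos 0)
      (PySem.List.pyGetD ar (PySem.Int.mod (pos + j) n) 0))

-- the 'while m:' loop with state (m, i, ar); Python diverges for negative m, which Pre_
-- excludes (m ≥ 1 before 'm -= 1'), so the m ≤ 0 guard is only a totality guard at m = 0.
def pvLoopA (n : Int) (m : Int) (i : Int) (ar : List Int) : List Int :=
  if m ≤ 0 then ar
  else
    pvLoopA n (PySem.Int.floordiv m 2) (i * 2)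
      (if PySem.Int.band m 1 = 1 then pvStepA n (PySem.Int.mod i n) ar else ar)
termination_by m.toNat
decreasing_by
  rename_i h
  rw [PySem.Int.floordiv_eq_ediv_of_pos (by omega : (0:Int) < 2)]
  omega

def generate_last_row (n : Int) (m : Int) (first_row : List Int) : List Int :=
  pvLoopA n (m - 1) 1 first_row

-- ===== PORT B =====
-- ker = [ker[r] ^ ker[(r - s) % n] for r in range(n)]  (multiply the kernel by 1 + X^s)
def pvKerStep (n : Int) (s : Int) (ker : List Int) : List Int :=
  (PySem.List.pyRange 0 n 1).map (fun r =>
    PySem.Int.bxor (PySem.List.pyGetD ker r 0)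
      (PySem.List.pyGetD ker (PySem.Int.mod (r - s) n) 0))

-- the 'while t:' loop with state (t, s, ker); as in A's port the t ≤ 0 guard is only a
-- totality guard (Pre_ gives t ≥ 1 on this branch, and t halves to 0).
def pvKerLoop (n : Int) (t : Int) (s : Int) (ker : List Int) : List Int :=
  if t ≤ 0 then ker
  else
    pvKerLoop n (PySem.Int.floordiv t 2) (PySem.Int.mod (s * 2) n)
      (if PySem.Int.band t 1 = 1 then pvKerStep n s ker else ker)
termination_by t.toNat
decreasing_by
  rename_i h
  rw [PySem.Int.floordiv_eq_ediv_of_pos (by omega : (0:Int) < 2)]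
  omega

-- the final gather pass: for p in range(n): v = 0; for r in range(n): if ker[r]: v ^= first_row[(p+r)%n]
-- ('if ker[r]:' is int truthiness, i.e. ker[r] ≠ 0; pyGetD default 0 exact as in port A)
def pvGather (n : Int) (ker : List Int) (row : List Int) : List Int :=
  (PySem.List.pyRange 0 n 1).map (fun p =>
    (PySem.List.pyRange 0 n 1).foldl (fun v r =>
      if PySem.List.pyGetD ker r 0 ≠ 0 then
        PySem.Int.bxor v (PySem.List.pyGetD row (PySem.Int.mod (p + r) n) 0)
      else v) 0)

def generate_last_row_alt (n : Int) (m : Int) (first_row : List Int) : List Int :=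
  if m - 1 = 0 then first_row
  else
    pvGather n
      (pvKerLoop n (m - 1) (PySem.Int.mod 1 n)
        ((PySem.List.pyRange 0 n 1).map (fun r => if r = 0 then 1 else 0)))
      first_row

-- ===== PRECONDITION & SPEC =====
-- Pre_ is exactly where A returns: it excludes m ≤ 0 (the 'while m:' loop never
-- terminates) and m ≥ 2 with n = 0 (ZeroDivisionError from 'i % n') or with
-- n > len(first_row) (IndexError from 'ar[pos]').
def Pre_generate_last_row (n : Int) (m : Int) (first_row : List Int) : Prop :=
  1 ≤ m ∧ (m = 1 ∨ n < 0 ∨ (1 ≤ n ∧ n ≤ (first_row.length : Int)))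
instance (n : Int) (m : Int) (first_row : List Int) : Decidable (Pre_generate_last_row n m first_row) := by unfold Pre_generate_last_row; infer_instance

def pvWitness_generate_last_row : Int × Int × List Int := (2, 3, [1, 2])

def Spec_generate_last_row (n : Int) (m : Int) (first_row : List Int) (out : List Int) : Prop := out = generate_last_row_alt n m first_row
instance (n : Int) (m : Int) (first_row : List Int) (out : List Int) : Decidable (Spec_generate_last_row n m first_row out) := by unfold Spec_generate_last_row; infer_instance

-- ===== CLAIM (what is proved, stated in full; the proofs are below) =====
def Claim_equal_generate_last_row : Prop := ∀ (n : Int) (m : Int) (first_row : List Int), Dom_generate_last_row n m first_row → Pre_generate_last_row n m first_row → Spec_generate_last_row n m first_row (generate_last_row n m first_row)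

-- ===== LEMMAS AND PROOFS =====

-- bxor agrees with Mathlib's Int.xor
theorem pv_bxor_eq (a b : Int) : PySem.Int.bxor a b = Int.xor a b := by
  unfold PySem.Int.bxor
  cases a with
  | ofNat m => cases b with
    | ofNat n => simp [Int.xor]
    | negSucc n => simp [Int.xor, Int.negSucc_eq]; omega
  | negSucc m => cases b with
    | ofNat n => simp [Int.xor, Int.negSucc_eq]; omega
    | negSucc n => simp [Int.xor, Int.negSucc_eq]; omega

theorem pv_natXor_cancel (u v w : ℕ) : (u ^^^ v) ^^^ (v ^^^ w) = u ^^^ w := by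
  rw [Nat.xor_assoc, ← Nat.xor_assoc v v w, Nat.xor_self, Nat.zero_xor]

theorem pv_intXor_cancel (u v w : Int) :
    Int.xor (Int.xor u v) (Int.xor v w) = Int.xor u w := by
  cases u <;> cases v <;> cases w <;> simp [Int.xor, pv_natXor_cancel]

theorem pv_bxor_cancel (u v w : Int) :
    PySem.Int.bxor (PySem.Int.bxor u v) (PySem.Int.bxor v w) = PySem.Int.bxor u w := by
  simp only [pv_bxor_eq, pv_intXor_cancel]

theorem pv_bxor_assoc (a b c : Int) :
    PySem.Int.bxor (PySem.Int.bxor a b) c = PySem.Int.bxor a (PySem.Int.bxor b c) := by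
  simp only [pv_bxor_eq]
  cases a <;> cases b <;> cases c <;> simp [Int.xor, Nat.xor_assoc]

theorem pv_bxor_zero (a : Int) : PySem.Int.bxor a 0 = a := by
  simp

theorem pv_zero_bxor (a : Int) : PySem.Int.bxor 0 a = a := by
  rw [PySem.Int.bxor_comm]; simp

theorem pv_mod_add_left (n x y : Int) (hn : 1 ≤ n) :
    PySem.Int.mod (PySem.Int.mod x n + y) n = PySem.Int.mod (x + y) n := by
  rw [PySem.Int.mod_eq_emod_of_pos (by omega), PySem.Int.mod_eq_emod_of_pos (by omega),
    PySem.Int.mod_eq_emod_of_pos (by omega), Int.emod_add_emod]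

theorem pv_mod_add_right (n x y : Int) (hn : 1 ≤ n) :
    PySem.Int.mod (x + PySem.Int.mod y n) n = PySem.Int.mod (x + y) n := by
  rw [PySem.Int.mod_eq_emod_of_pos (by omega), PySem.Int.mod_eq_emod_of_pos (by omega),
    PySem.Int.mod_eq_emod_of_pos (by omega), Int.add_emod_emod]

theorem pv_stepA_mod (n i : Int) (ar : List Int) (hn : 1 ≤ n) :
    pvStepA n (PySem.Int.mod i n) ar = pvStepA n i ar := by
  unfold pvStepA
  congr 1
  funext pos
  rw [pv_mod_add_right n pos i hn]

theorem pv_length_stepA (n j : Int) (ar : List Int) :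
    (pvStepA n j ar).length = n.toNat := by
  simp [pvStepA, PySem.List.length_pyRange_one]

-- squaring law: applying the shift-i transform twice is the shift-2i transform
theorem pv_stepA_sq (n i : Int) (ar : List Int) (hn : 1 ≤ n) :
    pvStepA n i (pvStepA n i ar) = pvStepA n (2 * i) ar := by
  apply List.ext_getElem
  · simp [pv_length_stepA]
  · intro k h1 h2
    have hk : (k : Int) < n := by
      rw [pv_length_stepA] at h1; omega
    have hk0 : (0:Int) ≤ (k : Int) := by positivity
    have hmem1 : (0:Int) ≤ PySem.Int.mod ((k : Int) + i) n ∧ PySem.Int.mod ((k : Int) + i) n < n :=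
      ⟨PySem.Int.mod_nonneg _ (by omega), PySem.Int.mod_lt _ (by omega)⟩
    simp only [pvStepA, List.getElem_map, PySem.List.getElem_pyRange_one, zero_add]
    rw [PySem.List.pyGetD_map_pyRange_of_nonneg _ n _ _ hk0 hk,
        PySem.List.pyGetD_map_pyRange_of_nonneg _ n _ _ hmem1.1 hmem1.2,
        pv_mod_add_left n ((k : Int) + i) i hn]
    have : (k : Int) + i + i = (k : Int) + 2 * i := by ring
    rw [this]
    exact pv_bxor_cancel _ _ _

-- per-step normal form used by the correctness proofs: iterated base transform
def pvIter (n : Int) : Nat → List Int → List Int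
  | 0, cur => cur
  | k+1, cur => pvIter n k (pvStepA n 1 cur)

theorem pv_length_iter (n : Int) (s : Nat) (ar : List Int) (ha : n.toNat ≤ ar.length) :
    n.toNat ≤ (pvIter n s ar).length := by
  induction s generalizing ar with
  | zero => exact ha
  | succ k ih =>
    have : (pvStepA n 1 ar).length = n.toNat := pv_length_stepA n 1 ar
    exact ih (pvStepA n 1 ar) (by omega)

theorem pv_iter_add (n : Int) (s t : Nat) (ar : List Int) :
    pvIter n (s + t) ar = pvIter n t (pvIter n s ar) := by
  induction s generalizing ar with
  | zero => rw [Nat.zero_add]; rfl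
  | succ k ih =>
    have : k + 1 + t = (k + t) + 1 := by omega
    rw [this]
    show pvIter n (k + t) (pvStepA n 1 ar) = _
    rw [ih (pvStepA n 1 ar)]
    rfl

-- power-of-two law: the shift-2^k transform is 2^k applications of the base transform
theorem pv_stepA_pow (n : Int) (k : Nat) (ar : List Int) (hn : 1 ≤ n)
    (ha : n.toNat ≤ ar.length) :
    pvStepA n ((2:Int)^k) ar = pvIter n (2^k) ar := by
  induction k generalizing ar with
  | zero => rw [pow_zero]; rfl
  | succ k ih =>
    have h2 : (2:Int)^(k+1) = 2 * (2:Int)^k := by ring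
    rw [h2, ← pv_stepA_sq n _ ar hn, ih ar ha,
        ih (pvIter n (2^k) ar) (pv_length_iter n _ ar ha), ← pv_iter_add]
    congr 1
    omega

-- loop invariant for A's bottom-up binary-exponentiation loop
theorem pv_loopA_eq (n : Int) (hn : 1 ≤ n) :
    ∀ (t : Nat) (m : Int), m.toNat = t → 0 ≤ m → ∀ (k : Nat) (ar : List Int),
      n.toNat ≤ ar.length → pvLoopA n m ((2:Int)^k) ar = pvIter n (m.toNat * 2^k) ar := by
  intro t
  induction t using Nat.strong_induction_on with
  | _ t ih =>
    intro m hmt hm k ar ha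
    rw [pvLoopA]
    by_cases hz : m ≤ 0
    · have : m = 0 := by omega
      simp [this]
      rfl
    · simp only [hz, if_false]
      have hfd : PySem.Int.floordiv m 2 = m / 2 :=
        PySem.Int.floordiv_eq_ediv_of_pos (by omega)
      have hb : PySem.Int.band m 1 = m % 2 := by
        rw [PySem.Int.band_one, PySem.Int.mod_eq_emod_of_pos (by omega)]
      have hpow : (2:Int)^k * 2 = (2:Int)^(k+1) := by ring
      have hlt : (m / 2).toNat < t := by omega
      by_cases hodd : m % 2 = 1
      · rw [if_pos (show PySem.Int.band m 1 = 1 from by rw [hb, hodd]), hfd, hpow,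
            pv_stepA_mod n _ ar hn, pv_stepA_pow n k ar hn ha,
            ih _ hlt (m / 2) rfl (by omega) (k+1) _
              (pv_length_iter n _ ar ha),
            ← pv_iter_add]
        congr 1
        have hm2 : m.toNat = 2 * (m / 2).toNat + 1 := by omega
        rw [hm2]
        ring
      · have hev : PySem.Int.band m 1 ≠ 1 := by rw [hb]; omega
        rw [if_neg hev, hfd, hpow, ih _ hlt (m / 2) rfl (by omega) (k+1) ar ha]
        congr 1
        have hm2 : m.toNat = 2 * (m / 2).toNat := by omega
        rw [hm2]
        ring

-- with n < 0, range(n) is empty, so one applied pass empties the row for good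
theorem pv_stepA_neg_nil (n j : Int) (ar : List Int) (hn : n < 0) : pvStepA n j ar = [] := by
  simp [pvStepA, PySem.List.pyRange_one_eq_nil (by omega : n ≤ (0:Int))]

theorem pv_loopA_nil (n : Int) (hn : n < 0) :
    ∀ (t : Nat) (m i : Int), m.toNat = t → pvLoopA n m i [] = [] := by
  intro t
  induction t using Nat.strong_induction_on with
  | _ t ih =>
    intro m i hmt
    rw [pvLoopA]
    by_cases hz : m ≤ 0
    · simp [hz]
    · simp only [hz, if_false, pv_stepA_neg_nil n _ _ hn, ite_self]
      have hfd : PySem.Int.floordiv m 2 = m / 2 :=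
        PySem.Int.floordiv_eq_ediv_of_pos (by omega)
      rw [hfd]
      exact ih (m / 2).toNat (by omega) _ _ rfl

theorem pv_loopA_neg (n : Int) (hn : n < 0) :
    ∀ (t : Nat) (m : Int), m.toNat = t → 1 ≤ m → ∀ (i : Int) (ar : List Int),
      pvLoopA n m i ar = [] := by
  intro t
  induction t using Nat.strong_induction_on with
  | _ t ih =>
    intro m hmt hm i ar
    rw [pvLoopA]
    have hz : ¬ m ≤ 0 := by omega
    have hfd : PySem.Int.floordiv m 2 = m / 2 :=
      PySem.Int.floordiv_eq_ediv_of_pos (by omega)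
    have hb : PySem.Int.band m 1 = m % 2 := by
      rw [PySem.Int.band_one, PySem.Int.mod_eq_emod_of_pos (by omega)]
    simp only [hz, if_false, hfd]
    by_cases hodd : PySem.Int.band m 1 = 1
    · rw [if_pos hodd, pv_stepA_neg_nil n _ _ hn]
      exact pv_loopA_nil n hn (m / 2).toNat (m / 2) _ rfl
    · rw [if_neg hodd]
      have hm2 : 2 ≤ m := by
        rw [hb] at hodd; omega
      exact ih (m / 2).toNat (by omega) (m / 2) rfl (by omega) _ ar

-- ===== B-side machinery: XOR-sums of lists =====

def pvXL (l : List Int) : Int := l.foldl PySem.Int.bxor 0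

theorem pv_bxor_bxor_comm (a b c d : Int) :
    PySem.Int.bxor (PySem.Int.bxor a b) (PySem.Int.bxor c d)
      = PySem.Int.bxor (PySem.Int.bxor a c) (PySem.Int.bxor b d) := by
  rw [pv_bxor_assoc, pv_bxor_assoc]
  congr 1
  rw [← pv_bxor_assoc, ← pv_bxor_assoc, PySem.Int.bxor_comm b c]

theorem pv_xl_foldl (l : List Int) : ∀ (a : Int),
    l.foldl PySem.Int.bxor a = PySem.Int.bxor a (pvXL l) := by
  induction l with
  | nil => intro a; simp [pvXL]
  | cons b l ih =>
    intro a
    show l.foldl _ (PySem.Int.bxor a b) = _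
    rw [ih]
    have h2 : pvXL (b :: l) = PySem.Int.bxor b (pvXL l) := by
      show l.foldl _ (PySem.Int.bxor 0 b) = _
      rw [ih, pv_zero_bxor]
    rw [h2, pv_bxor_assoc]

theorem pv_xl_cons (a : Int) (l : List Int) : pvXL (a :: l) = PySem.Int.bxor a (pvXL l) := by
  show l.foldl _ (PySem.Int.bxor 0 a) = _
  rw [pv_xl_foldl, pv_zero_bxor]

theorem pv_xl_perm {l l' : List Int} (h : l.Perm l') : pvXL l = pvXL l' := by
  induction h with
  | nil => rfl
  | cons x _ ih => rw [pv_xl_cons, pv_xl_cons, ih]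
  | swap x y l =>
    rw [pv_xl_cons, pv_xl_cons, pv_xl_cons, pv_xl_cons, ← pv_bxor_assoc, ← pv_bxor_assoc,
      PySem.Int.bxor_comm y x]
  | trans _ _ ih1 ih2 => rw [ih1, ih2]

theorem pv_xl_combine (g1 g2 : Int → Int) :
    ∀ (l : List Int), PySem.Int.bxor (pvXL (l.map g1)) (pvXL (l.map g2))
      = pvXL (l.map (fun r => PySem.Int.bxor (g1 r) (g2 r))) := by
  intro l
  induction l with
  | nil => simp [pvXL]
  | cons a l ih =>
    simp only [List.map_cons, pv_xl_cons]
    rw [pv_bxor_bxor_comm, ih]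

theorem pv_xl_zeros (g : Int → Int) :
    ∀ (l : List Int), (∀ x ∈ l, g x = 0) → pvXL (l.map g) = 0 := by
  intro l
  induction l with
  | nil => intro _; rfl
  | cons a l ih =>
    intro h
    rw [List.map_cons, pv_xl_cons, h a (by simp), pv_zero_bxor,
      ih (fun x hx => h x (by simp [hx]))]

-- a conditional-accumulate fold is the XOR-sum of the 'if … then value else 0' list
theorem pv_fold_ite_xl (P : Int → Prop) [DecidablePred P] (f : Int → Int) (l : List Int) :
    ∀ (a : Int),
      l.foldl (fun v r => if P r then PySem.Int.bxor v (f r) else v) a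
        = PySem.Int.bxor a (pvXL (l.map (fun r => if P r then f r else 0))) := by
  induction l with
  | nil => intro a; simp [pvXL]
  | cons b l ih =>
    intro a
    rw [List.map_cons, pv_xl_cons, List.foldl_cons]
    by_cases hb : P b
    · rw [if_pos hb, if_pos hb, ih, ← pv_bxor_assoc]
    · rw [if_neg hb, if_neg hb, ih, pv_zero_bxor]

-- mod on a window of width 2n
theorem pv_mod_window (n x : Int) (hn : 1 ≤ n) (h0 : 0 ≤ x) (h2 : x < 2 * n) :
    PySem.Int.mod x n = if x < n then x else x - n := by
  rw [PySem.Int.mod_eq_emod_of_pos (by omega)]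
  by_cases h : x < n
  · rw [if_pos h, Int.emod_eq_of_lt h0 h]
  · rw [if_neg h, ← Int.sub_emod_right x n, Int.emod_eq_of_lt (by omega) (by omega)]

theorem pv_mod_small (n x : Int) (hn : 1 ≤ n) (h0 : 0 ≤ x) (hx : x < n) :
    PySem.Int.mod x n = x := by
  rw [PySem.Int.mod_eq_emod_of_pos (by omega), Int.emod_eq_of_lt h0 hx]

-- r ↦ (r+s) % n permutes range(n): the image is the rotation range(s') ++ range(0,s')
theorem pv_rot_map (n s : Int) (hn : 1 ≤ n) :
    (PySem.List.pyRange 0 n 1).map (fun r => PySem.Int.mod (r + s) n)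
      = PySem.List.pyRange (PySem.Int.mod s n) n 1 ++ PySem.List.pyRange 0 (PySem.Int.mod s n) 1 := by
  have hs0 : 0 ≤ PySem.Int.mod s n := PySem.Int.mod_nonneg _ (by omega)
  have hsn : PySem.Int.mod s n < n := PySem.Int.mod_lt _ (by omega)
  apply List.ext_getElem
  · simp only [List.length_map, List.length_append, PySem.List.length_pyRange_one]
    omega
  · intro i h1 h2
    have hi : (i : Int) < n := by
      simp only [List.length_map, PySem.List.length_pyRange_one] at h1
      omega
    rw [List.getElem_map, PySem.List.getElem_pyRange_one, zero_add]
    have e1 : PySem.Int.mod ((i : Int) + s) n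
        = PySem.Int.mod ((i : Int) + PySem.Int.mod s n) n :=
      (pv_mod_add_right n (i : Int) s hn).symm
    rw [e1, pv_mod_window n ((i : Int) + PySem.Int.mod s n) hn (by omega) (by omega)]
    by_cases hsplit : (i : Int) + PySem.Int.mod s n < n
    · have hi1 : i < (PySem.List.pyRange (PySem.Int.mod s n) n 1).length := by
        rw [PySem.List.length_pyRange_one]; omega
      rw [if_pos hsplit, List.getElem_append_left hi1, PySem.List.getElem_pyRange_one]
      omega
    · have hge : (PySem.List.pyRange (PySem.Int.mod s n) n 1).length ≤ i := by
        rw [PySem.List.length_pyRange_one]; omega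
      rw [if_neg hsplit, List.getElem_append_right hge, PySem.List.getElem_pyRange_one,
        PySem.List.length_pyRange_one]
      omega

theorem pv_rot_perm (n s : Int) (hn : 1 ≤ n) :
    ((PySem.List.pyRange 0 n 1).map (fun r => PySem.Int.mod (r + s) n)).Perm
      (PySem.List.pyRange 0 n 1) := by
  have hs0 : 0 ≤ PySem.Int.mod s n := PySem.Int.mod_nonneg _ (by omega)
  have hsn : PySem.Int.mod s n < n := PySem.Int.mod_lt _ (by omega)
  rw [pv_rot_map n s hn]
  refine (List.perm_append_comm).trans ?_
  rw [← PySem.List.pyRange_one_append 0 (PySem.Int.mod s n) n hs0 (by omega)]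

-- ===== the gather pass in XOR-sum normal form =====

def pvG (n : Int) (ker row : List Int) (p : Int) : Int :=
  pvXL ((PySem.List.pyRange 0 n 1).map (fun r =>
    if PySem.List.pyGetD ker r 0 ≠ 0 then
      PySem.List.pyGetD row (PySem.Int.mod (p + r) n) 0
    else 0))

theorem pv_gather_eq (n : Int) (ker row : List Int) :
    pvGather n ker row = (PySem.List.pyRange 0 n 1).map (fun p => pvG n ker row p) := by
  unfold pvGather pvG
  congr 1
  funext p
  rw [pv_fold_ite_xl (fun r => PySem.List.pyGetD ker r 0 ≠ 0)
    (fun r => PySem.List.pyGetD row (PySem.Int.mod (p + r) n) 0), pv_zero_bxor]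

theorem pv_length_gather (n : Int) (ker row : List Int) :
    (pvGather n ker row).length = n.toNat := by
  simp [pvGather, PySem.List.length_pyRange_one]

theorem pv_ker_val (n : Int) (ker : List Int) (hn : 1 ≤ n) (hlen : ker.length = n.toNat)
    (h01 : ∀ x ∈ ker, x = 0 ∨ x = 1) (i : Int) (h0 : 0 ≤ i) (hi : i < n) :
    PySem.List.pyGetD ker i 0 = 0 ∨ PySem.List.pyGetD ker i 0 = 1 := by
  exact h01 _ (PySem.List.pyGetD_mem ker 0 (by
    simp only [PySem.Raise.InRange]
    omega))

theorem pv_kerStep_len (n s : Int) (ker : List Int) :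
    (pvKerStep n s ker).length = n.toNat := by
  simp [pvKerStep, PySem.List.length_pyRange_one]

theorem pv_kerStep_01 (n s : Int) (ker : List Int) (hn : 1 ≤ n) (hlen : ker.length = n.toNat)
    (h01 : ∀ x ∈ ker, x = 0 ∨ x = 1) :
    ∀ x ∈ pvKerStep n s ker, x = 0 ∨ x = 1 := by
  intro x hx
  rw [pvKerStep, List.mem_map] at hx
  obtain ⟨r, hr, rfl⟩ := hx
  rw [PySem.List.mem_pyRange_one] at hr
  have ha := pv_ker_val n ker hn hlen h01 r hr.1 hr.2
  have hb := pv_ker_val n ker hn hlen h01 (PySem.Int.mod (r - s) n)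
    (PySem.Int.mod_nonneg _ (by omega)) (PySem.Int.mod_lt _ (by omega))
  rcases ha with ha | ha <;> rcases hb with hb | hb <;> rw [ha, hb] <;> decide

theorem pv_ite_bxor_split (a b X : Int) (ha : a = 0 ∨ a = 1) (hb : b = 0 ∨ b = 1) :
    (if PySem.Int.bxor a b ≠ 0 then X else 0)
      = PySem.Int.bxor (if a ≠ 0 then X else 0) (if b ≠ 0 then X else 0) := by
  rcases ha with rfl | rfl <;> rcases hb with rfl | rfl
  · simp
  · simp [(by decide : PySem.Int.bxor (0:Int) 1 = 1), pv_zero_bxor]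
  · simp [(by decide : PySem.Int.bxor (1:Int) 0 = 1)]
  · simp [PySem.Int.bxor_self]

-- the commuting law: gathering through a kernel step is the shift-XOR step on the gathered row
theorem pv_G_step (n s p : Int) (ker row : List Int) (hn : 1 ≤ n) (_hp0 : 0 ≤ p) (_hpn : p < n)
    (hlen : ker.length = n.toNat) (h01 : ∀ x ∈ ker, x = 0 ∨ x = 1) :
    pvG n (pvKerStep n s ker) row p
      = PySem.Int.bxor (pvG n ker row p) (pvG n ker row (PySem.Int.mod (p + s) n)) := by
  have hRm : ∀ r ∈ PySem.List.pyRange 0 n 1, 0 ≤ r ∧ r < n := by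
    intro r hr
    rwa [PySem.List.mem_pyRange_one] at hr
  have h1 : pvG n (pvKerStep n s ker) row p
      = pvXL ((PySem.List.pyRange 0 n 1).map (fun r =>
          if PySem.Int.bxor (PySem.List.pyGetD ker r 0)
              (PySem.List.pyGetD ker (PySem.Int.mod (r - s) n) 0) ≠ 0 then
            PySem.List.pyGetD row (PySem.Int.mod (p + r) n) 0
          else 0)) := by
    unfold pvG pvKerStep
    congr 1
    apply List.map_congr_left
    intro r hr
    obtain ⟨hr0, hrn⟩ := hRm r hr
    rw [PySem.List.pyGetD_map_pyRange_of_nonneg _ n _ _ hr0 hrn]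
  have h2 : pvG n ker row (PySem.Int.mod (p + s) n)
      = pvXL (((PySem.List.pyRange 0 n 1).map (fun r => PySem.Int.mod (r + s) n)).map
          (fun r' => if PySem.List.pyGetD ker (PySem.Int.mod (r' - s) n) 0 ≠ 0 then
              PySem.List.pyGetD row (PySem.Int.mod (p + r') n) 0 else 0)) := by
    unfold pvG
    congr 1
    rw [List.map_map]
    apply List.map_congr_left
    intro r hr
    obtain ⟨hr0, hrn⟩ := hRm r hr
    simp only [Function.comp_apply]
    have e1 : PySem.Int.mod (PySem.Int.mod (r + s) n - s) n = r := by
      rw [sub_eq_add_neg, pv_mod_add_left n (r + s) (-s) hn,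
        show r + s + -s = r by ring, pv_mod_small n r hn hr0 hrn]
    have e2 : PySem.Int.mod (p + PySem.Int.mod (r + s) n) n
        = PySem.Int.mod (PySem.Int.mod (p + s) n + r) n := by
      rw [pv_mod_add_right n p (r + s) hn, pv_mod_add_left n (p + s) r hn,
        show p + (r + s) = p + s + r by ring]
    rw [e1, e2]
  have h3 : pvG n ker row (PySem.Int.mod (p + s) n)
      = pvXL ((PySem.List.pyRange 0 n 1).map (fun r' =>
          if PySem.List.pyGetD ker (PySem.Int.mod (r' - s) n) 0 ≠ 0 then
            PySem.List.pyGetD row (PySem.Int.mod (p + r') n) 0 else 0)) := by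
    rw [h2]
    exact pv_xl_perm (List.Perm.map _ (pv_rot_perm n s hn))
  rw [h1, h3]
  unfold pvG
  rw [pv_xl_combine]
  congr 1
  apply List.map_congr_left
  intro r hr
  obtain ⟨hr0, hrn⟩ := hRm r hr
  exact pv_ite_bxor_split _ _ _ (pv_ker_val n ker hn hlen h01 r hr0 hrn)
    (pv_ker_val n ker hn hlen h01 _ (PySem.Int.mod_nonneg _ (by omega))
      (PySem.Int.mod_lt _ (by omega)))

theorem pv_gather_step (n s : Int) (ker row : List Int) (hn : 1 ≤ n)
    (hlen : ker.length = n.toNat) (h01 : ∀ x ∈ ker, x = 0 ∨ x = 1) :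
    pvGather n (pvKerStep n s ker) row = pvStepA n s (pvGather n ker row) := by
  rw [pv_gather_eq, pv_gather_eq]
  unfold pvStepA
  apply List.ext_getElem
  · simp [PySem.List.length_pyRange_one]
  · intro k h1 h2
    have hk : (k : Int) < n := by
      simp only [List.length_map, PySem.List.length_pyRange_one] at h1
      omega
    have hmem1 : (0:Int) ≤ PySem.Int.mod ((k : Int) + s) n ∧ PySem.Int.mod ((k : Int) + s) n < n :=
      ⟨PySem.Int.mod_nonneg _ (by omega), PySem.Int.mod_lt _ (by omega)⟩
    simp only [List.getElem_map, PySem.List.getElem_pyRange_one, zero_add]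
    rw [PySem.List.pyGetD_map_pyRange_of_nonneg _ n _ _ (by positivity) hk,
        PySem.List.pyGetD_map_pyRange_of_nonneg _ n _ _ hmem1.1 hmem1.2]
    exact pv_G_step n s (k : Int) ker row hn (by positivity) hk hlen h01

-- the initial kernel (the indicator of 0) gathers to the first n entries of the row
theorem pv_gather_init (n : Int) (row : List Int) (hn : 1 ≤ n) :
    pvGather n ((PySem.List.pyRange 0 n 1).map (fun r => if r = 0 then 1 else 0)) row
      = (PySem.List.pyRange 0 n 1).map (fun p => PySem.List.pyGetD row p 0) := by
  rw [pv_gather_eq]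
  apply List.map_congr_left
  intro p hp
  rw [PySem.List.mem_pyRange_one] at hp
  unfold pvG
  have hmc : ((PySem.List.pyRange 0 n 1).map (fun r =>
      if PySem.List.pyGetD ((PySem.List.pyRange 0 n 1).map
          (fun r => if r = 0 then (1:Int) else 0)) r 0 ≠ 0 then
        PySem.List.pyGetD row (PySem.Int.mod (p + r) n) 0
      else 0))
      = (PySem.List.pyRange 0 n 1).map (fun r =>
        if r = 0 then PySem.List.pyGetD row (PySem.Int.mod (p + r) n) 0 else 0) := by
    apply List.map_congr_left
    intro r hr
    rw [PySem.List.mem_pyRange_one] at hr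
    rw [PySem.List.pyGetD_map_pyRange_of_nonneg _ n _ _ hr.1 hr.2]
    by_cases h0 : r = 0
    · rw [if_pos h0, if_pos h0, if_pos (by norm_num)]
    · rw [if_neg h0, if_neg h0, if_neg (by norm_num)]
  rw [hmc, PySem.List.pyRange_one_cons (by omega : (0:Int) < n), List.map_cons, pv_xl_cons,
    if_pos rfl, add_zero, pv_mod_small n p hn hp.1 hp.2,
    pv_xl_zeros _ _ (by
      intro r hr
      rw [PySem.List.mem_pyRange_one] at hr
      rw [if_neg (by omega)]), pv_bxor_zero]

theorem pv_stepA_init (n j : Int) (row : List Int) (hn : 1 ≤ n) :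
    pvStepA n j ((PySem.List.pyRange 0 n 1).map (fun p => PySem.List.pyGetD row p 0))
      = pvStepA n j row := by
  unfold pvStepA
  apply List.map_congr_left
  intro pos hpos
  rw [PySem.List.mem_pyRange_one] at hpos
  rw [PySem.List.pyGetD_map_pyRange_of_nonneg _ n _ _ hpos.1 hpos.2,
    PySem.List.pyGetD_map_pyRange_of_nonneg _ n _ _
      (PySem.Int.mod_nonneg _ (by omega)) (PySem.Int.mod_lt _ (by omega))]

-- loop invariant for B's kernel-building loop
theorem pv_kerLoop_eq (n : Int) (hn : 1 ≤ n) (row : List Int) :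
    ∀ (tn : Nat) (t : Int), t.toNat = tn → 0 ≤ t → ∀ (k : Nat) (ker : List Int),
      ker.length = n.toNat → (∀ x ∈ ker, x = 0 ∨ x = 1) →
      pvGather n (pvKerLoop n t (PySem.Int.mod ((2:Int)^k) n) ker) row
        = pvIter n (t.toNat * 2^k) (pvGather n ker row) := by
  intro tn
  induction tn using Nat.strong_induction_on with
  | _ tn ih =>
    intro t htn ht k ker hklen hk01
    rw [pvKerLoop]
    by_cases hz : t ≤ 0
    · have : t = 0 := by omega
      simp [this]
      rfl
    · simp only [hz, if_false]
      have hfd : PySem.Int.floordiv t 2 = t / 2 :=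
        PySem.Int.floordiv_eq_ediv_of_pos (by omega)
      have hb : PySem.Int.band t 1 = t % 2 := by
        rw [PySem.Int.band_one, PySem.Int.mod_eq_emod_of_pos (by omega)]
      have hs2 : PySem.Int.mod (PySem.Int.mod ((2:Int)^k) n * 2) n
          = PySem.Int.mod ((2:Int)^(k+1)) n := by
        rw [PySem.Int.mod_eq_emod_of_pos (by omega), PySem.Int.mod_eq_emod_of_pos (by omega),
          PySem.Int.mod_eq_emod_of_pos (by omega), Int.mul_emod, Int.emod_emod_of_dvd _ dvd_rfl,
          ← Int.mul_emod, pow_succ]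
      have hlt : (t / 2).toNat < tn := by omega
      have hglen : n.toNat ≤ (pvGather n ker row).length := by
        rw [pv_length_gather]
      by_cases hodd : t % 2 = 1
      · rw [if_pos (show PySem.Int.band t 1 = 1 from by rw [hb, hodd]), hfd, hs2,
            ih _ hlt (t / 2) rfl (by omega) (k+1) _ (pv_kerStep_len n _ ker)
              (pv_kerStep_01 n _ ker hn hklen hk01),
            pv_gather_step n _ ker row hn hklen hk01,
            pv_stepA_mod n _ _ hn, pv_stepA_pow n k _ hn hglen, ← pv_iter_add]
        congr 1
        have ht2 : t.toNat = 2 * (t / 2).toNat + 1 := by omega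
        rw [ht2]
        ring
      · have hev : PySem.Int.band t 1 ≠ 1 := by rw [hb]; omega
        rw [if_neg hev, hfd, hs2, ih _ hlt (t / 2) rfl (by omega) (k+1) ker hklen hk01]
        congr 1
        have ht2 : t.toNat = 2 * (t / 2).toNat := by omega
        rw [ht2]
        ring

-- ===== VERDICT (by name: the statement is the Claim_ definition above) =====
theorem generate_last_row_spec : Claim_equal_generate_last_row := by
  intro n m first_row _ hpre
  obtain ⟨hm, hcase⟩ := hpre
  unfold Spec_generate_last_row generate_last_row generate_last_row_alt
  by_cases hm1 : m = 1
  · subst hm1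
    rw [show (1:Int) - 1 = 0 by norm_num, if_pos rfl, pvLoopA, if_pos (le_refl (0:Int))]
  · have hm2 : 2 ≤ m := by omega
    rw [if_neg (show ¬ (m - 1 = 0) by omega)]
    rcases hcase with h1 | hneg | ⟨hn, hlen⟩
    · omega
    · rw [pv_loopA_neg n hneg (m-1).toNat (m-1) rfl (by omega) 1 first_row]
      simp [pvGather, PySem.List.pyRange_one_eq_nil (show n ≤ (0:Int) by omega)]
    · have hlen' : n.toNat ≤ first_row.length := by omega
      have hA := pv_loopA_eq n hn (m-1).toNat (m-1) rfl (by omega) 0 first_row hlen'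
      simp only [pow_zero, mul_one] at hA
      have hker01 : ∀ x ∈ (PySem.List.pyRange 0 n 1).map (fun r => if r = 0 then (1:Int) else 0),
          x = 0 ∨ x = 1 := by
        intro x hx
        rw [List.mem_map] at hx
        obtain ⟨r, _, rfl⟩ := hx
        split_ifs <;> simp
      have hB := pv_kerLoop_eq n hn first_row (m-1).toNat (m-1) rfl (by omega) 0 _
        (by simp [PySem.List.length_pyRange_one]) hker01
      simp only [pow_zero, mul_one] at hB
      rw [hA, hB, pv_gather_init n first_row hn]
      obtain ⟨u, hu⟩ : ∃ u, (m-1).toNat = u + 1 := ⟨(m-1).toNat - 1, by omega⟩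
      rw [hu]
      show pvIter n u (pvStepA n 1 first_row) = pvIter n u (pvStepA n 1 _)
      rw [pv_stepA_init n 1 first_row hn]
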